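-- pv_equiv track=rewrite | github.com/mathunjoroge/hospital | departments/nlp/kenyalaw_scraper.py | extract_bill_of_rights
-- ===== SOURCE A (Python) =====
-- def extract_bill_of_rights(content: str) -> str:
--     """Extract bill of rights from constitution content"""
--     if not isinstance(content, str):
--         return "Bill of Rights content not found"
--
--     lines = content.split('\n')
--     rights_lines = []
--     in_rights = False
--
--     for line in lines:
--         line = line.strip()
--         if 'bill of rights' in line.lower() or 'chapter four' in line.lower():
--             in_rights = True
--         if in_rights and line:
--             rights_lines.append(line)
--         elif in_rights and 'chapter five' in line.lower():
--             break
--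
--     return ' '.join(rights_lines) if rights_lines else "Bill of Rights content not found"
-- ===== SOURCE B (Python) =====
-- def extract_bill_of_rights(content: str) -> str:
--     """Extract bill of rights from constitution content"""
--     if not isinstance(content, str):
--         return "Bill of Rights content not found"
--     lines = content.split('\n')
--     for i, line in enumerate(lines):
--         low = line.strip().lower()
--         if 'bill of rights' in low or 'chapter four' in low:
--             return ' '.join(t for t in (l.strip() for l in lines[i:]) if t)
--     return "Bill of Rights content not found"
-- ===== Notes on version B (the rewrite author's own statement) =====
-- stated objective: simpler
-- what changed: B replaces A's single accumulating pass with boolean state (and its dead chapter-five break) by a two-phase locate-then-slice: find the first marker line, then join the non-empty stripped lines of the tail.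
import Mathlib
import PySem

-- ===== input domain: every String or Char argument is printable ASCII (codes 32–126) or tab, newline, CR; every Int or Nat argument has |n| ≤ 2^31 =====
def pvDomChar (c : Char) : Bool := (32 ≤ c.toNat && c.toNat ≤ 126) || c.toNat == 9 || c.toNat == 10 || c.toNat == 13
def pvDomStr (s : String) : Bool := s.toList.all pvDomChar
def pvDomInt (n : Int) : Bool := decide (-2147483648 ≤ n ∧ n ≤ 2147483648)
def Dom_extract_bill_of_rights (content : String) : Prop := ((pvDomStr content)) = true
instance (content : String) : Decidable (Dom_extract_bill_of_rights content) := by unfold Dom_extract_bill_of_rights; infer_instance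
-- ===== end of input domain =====

-- B replaces A's single accumulating pass (with a dead chapter-five break) by locate-the-marker-then-slice-and-join; proved equal on all strings.


-- ===== PORT A =====
-- marker test on an already-stripped line, as A writes it: 'bill of rights' in line.lower() or 'chapter four' in line.lower()
def pvMarkA (s : String) : Bool :=
  PySem.Str.isIn "bill of rights" (PySem.Str.lower s) || PySem.Str.isIn "chapter four" (PySem.Str.lower s)

-- A's for-loop: state (rights_lines, in_rights); the elif is the (dead) chapter-five break
def pvLoopA : List String → List String → Bool → List String
  | [], acc, _ => acc
  | l :: ls, acc, flag =>
    let s := PySem.Str.strip l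
    let flag' := flag || pvMarkA s
    if flag' = true ∧ s ≠ "" then pvLoopA ls (acc ++ [s]) flag'
    else if flag' = true ∧ PySem.Str.isIn "chapter five" (PySem.Str.lower s) = true then acc
    else pvLoopA ls acc flag'

def extract_bill_of_rights (content : String) : String :=
  let lines := (PySem.Str.split? content "\n").getD []
  let rights := pvLoopA lines [] false
  if rights = [] then "Bill of Rights content not found" else PySem.Str.join " " rights

-- ===== PORT B =====
-- B's marker test on the raw line (it strips and lowers itself)
def pvMarkB (l : String) : Bool :=
  let low := PySem.Str.lower (PySem.Str.strip l)
  PySem.Str.isIn "bill of rights" low || PySem.Str.isIn "chapter four" low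

-- phase 1: the enumerate loop — the tail of lines from the first marker line, if any
def pvFindTail : List String → Option (List String)
  | [] => none
  | l :: ls => if pvMarkB l then some (l :: ls) else pvFindTail ls

def extract_bill_of_rights_alt (content : String) : String :=
  match pvFindTail ((PySem.Str.split? content "\n").getD []) with
  | none => "Bill of Rights content not found"
  | some tl => PySem.Str.join " " ((tl.map PySem.Str.strip).filter (· ≠ ""))

-- ===== PRECONDITION & SPEC =====
def Spec_extract_bill_of_rights (content : String) (out : String) : Prop := out = extract_bill_of_rights_alt content
instance (content : String) (out : String) : Decidable (Spec_extract_bill_of_rights content out) := by unfold Spec_extract_bill_of_rights; infer_instance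

-- ===== CLAIM (what is proved, stated in full; the proofs are below) =====
def Claim_equal_extract_bill_of_rights : Prop := ∀ (content : String), Dom_extract_bill_of_rights content → Spec_extract_bill_of_rights content (extract_bill_of_rights content)

-- ===== LEMMAS AND PROOFS =====

-- a marker line cannot strip to the empty string
theorem pvMarkB_strip_ne (l : String) (h : pvMarkB l = true) : PySem.Str.strip l ≠ "" := by
  intro he
  rw [pvMarkB] at h
  rw [he] at h
  exact absurd h (by decide)

-- once in_rights is set, A just appends every non-empty stripped line
theorem pvLoopA_true (ls : List String) (acc : List String) :
    pvLoopA ls acc true = acc ++ (ls.map PySem.Str.strip).filter (· ≠ "") := by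
  induction ls generalizing acc with
  | nil => simp [pvLoopA]
  | cons l ls ih =>
    by_cases hs : PySem.Str.strip l = ""
    · have hfive : PySem.Str.isIn "chapter five" (PySem.Str.lower (PySem.Str.strip l)) = false := by
        rw [hs]; decide
      simp [pvLoopA, hs, ih]
      exact fun h => absurd h (by decide)
    · simp [pvLoopA, hs, ih]

-- before the marker, A's loop is exactly phase 1 of B
theorem pvLoopA_false (ls : List String) (acc : List String) :
    pvLoopA ls acc false =
      match pvFindTail ls with
      | none => acc
      | some tl => acc ++ (tl.map PySem.Str.strip).filter (· ≠ "") := by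
  induction ls generalizing acc with
  | nil => simp [pvLoopA, pvFindTail]
  | cons l ls ih =>
    by_cases hm : pvMarkB l = true
    · have hA : pvMarkA (PySem.Str.strip l) = true := hm
      have hs := pvMarkB_strip_ne l hm
      simp [pvLoopA, pvFindTail, hm, hA, hs, pvLoopA_true]
    · have hA : pvMarkA (PySem.Str.strip l) = false := Bool.eq_false_iff.mpr hm
      simp [pvLoopA, pvFindTail, hm, hA, ih]

-- a found tail starts with its marker line, so the filtered list is non-empty
theorem pvFindTail_shape (ls tl : List String) (h : pvFindTail ls = some tl) :
    ∃ l ls', tl = l :: ls' ∧ pvMarkB l = true := by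
  induction ls with
  | nil => simp [pvFindTail] at h
  | cons l ls ih =>
    by_cases hm : pvMarkB l = true
    · simp [pvFindTail, hm] at h
      exact ⟨l, ls, h.symm, hm⟩
    · simp [pvFindTail, hm] at h
      exact ih h

-- ===== VERDICT (by name: the statement is the Claim_ definition above) =====
theorem extract_bill_of_rights_spec : Claim_equal_extract_bill_of_rights := by
  intro content _
  show extract_bill_of_rights content = extract_bill_of_rights_alt content
  rw [extract_bill_of_rights, extract_bill_of_rights_alt, pvLoopA_false]
  cases hft : pvFindTail ((PySem.Str.split? content "\n").getD []) with
  | none => simp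
  | some tl =>
    obtain ⟨l, ls', rfl, hm⟩ := pvFindTail_shape _ _ hft
    have hs := pvMarkB_strip_ne l hm
    simp [hs]
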